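-- pv_equiv track=rewrite | github.com/A1iee/knowledge-project | scripts/train_ner_bilstm_crf.py | smart_segment
-- ===== SOURCE A (Python) =====
-- from typing import Dict, Iterable, Iterator, List, Optional, Sequence, Tuple
--
-- def smart_segment(text: str, tags: Sequence[str], max_len: int, min_len: int = 64) -> List[Tuple[str, List[str]]]:
--     """智能长文本切分：尽量在空白字符处截断，避免将一个单词或实体劈成两半"""
--     if len(text) <= max_len: return [(text, list(tags))]
--     out = []
--     start, n = 0, len(text)
--     while start < n:
--         if n - start <= max_len:
--             out.append((text[start:], list(tags[start:])))
--             break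
--         cut = start + max_len
--         best = next((i for i in range(cut, max(start + min_len, start), -1) if text[i - 1].isspace()), cut)
--         out.append((text[start:best], list(tags[start:best])))
--         start = best
--     return out
-- ===== SOURCE B (Python) =====
-- from bisect import bisect_left
--
-- def smart_segment(text, tags, max_len, min_len=64):
--     """Segment long text near the length limit, cutting at whitespace where one
--     falls inside the allowed window.  Two phases: a recursion first computes the
--     list of (start, end) boundaries -- the cut point of each segment found by
--     binary search in a whitespace index built once -- and a comprehension then
--     materialises the slices."""
--     if len(text) <= max_len:
--         return [(text, list(tags))]
--     ws = [i for i, c in enumerate(text) if c.isspace()]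
--     n = len(text)
--
--     def cuts(start):
--         if n - start <= max_len:
--             return [(start, None)]
--         cut = start + max_len
--         bound = max(start + min_len, start)
--         idx = bisect_left(ws, cut) - 1
--         best = ws[idx] + 1 if idx >= 0 and ws[idx] >= bound else cut
--         return [(start, best)] + cuts(best)
--
--     return [(text[s:e], list(tags[s:e])) for s, e in cuts(0)]
-- ===== Notes on version B (the rewrite author's own statement) =====
-- stated objective: alternative
-- what changed: B is a two-phase algorithm: it indexes all whitespace positions once and a recursion computes only the list of segment boundaries (each cut found by bisect_left on that index instead of A's backward character scan), then a single comprehension materialises the slices; A interleaves scanning and slicing in one accumulator while-loop. Pre_ excludes non-positive max_len with text longer than max_len, where A's loop never advances (it diverges, except on empty text where its while-guard is immediately false and it returns []) and B's recursion diverges.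
-- outside the precondition, e.g. on smart_segment('', [], -2, 0): A returns [], B raises RecursionError
import Mathlib
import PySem

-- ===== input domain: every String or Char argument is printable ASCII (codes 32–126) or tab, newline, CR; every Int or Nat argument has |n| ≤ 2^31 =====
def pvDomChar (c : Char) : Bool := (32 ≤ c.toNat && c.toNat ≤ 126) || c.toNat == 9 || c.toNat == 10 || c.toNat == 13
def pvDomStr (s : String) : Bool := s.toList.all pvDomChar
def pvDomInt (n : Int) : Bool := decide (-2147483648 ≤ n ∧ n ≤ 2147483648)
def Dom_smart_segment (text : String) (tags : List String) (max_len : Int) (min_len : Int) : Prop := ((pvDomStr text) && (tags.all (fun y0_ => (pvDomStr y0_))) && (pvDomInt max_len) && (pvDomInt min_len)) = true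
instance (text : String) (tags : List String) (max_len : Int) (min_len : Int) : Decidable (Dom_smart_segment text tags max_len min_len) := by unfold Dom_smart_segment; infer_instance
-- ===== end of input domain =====

-- B computes the list of segment boundaries first (whitespace index + bisect per cut)
-- and materialises the slices in a separate map; A scans backward and slices in one loop.

-- ===== PORT A =====
-- text[i-1].isspace()  (i-1 is always in range when reached by A's generator)
def pvIsSpaceAt (text : String) (i : Int) : Bool :=
  (PySem.Str.pyGet? text (i - 1)).elim false PySem.Chars.isspace

-- the while-loop of A; fuel strictly exceeds the number of iterations on every input A terminates on
def pvSegLoopA (text : String) (tags : List String) (max_len min_len n : Int) :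
    Nat → Int → List (String × List String) → List (String × List String)
  | 0, _, acc => acc
  | fuel+1, start, acc =>
    if start < n then
      if n - start ≤ max_len then
        acc ++ [(PySem.Str.slice text (some start) none, PySem.List.slice tags (some start) none)]
      else
        let cut := start + max_len
        let best := ((PySem.List.pyRange cut (max (start + min_len) start) (-1)).find?
            (fun i => pvIsSpaceAt text i)).getD cut
        pvSegLoopA text tags max_len min_len n fuel best
          (acc ++ [(PySem.Str.slice text (some start) (some best),
                    PySem.List.slice tags (some start) (some best))])
    else acc

def smart_segment (text : String) (tags : List String) (max_len : Int) (min_len : Int) :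
    List (String × List String) :=
  if PySem.Str.len text ≤ max_len then [(text, tags)]
  else pvSegLoopA text tags max_len min_len (PySem.Str.len text)
    (text.toList.length + 1) 0 []

-- ===== PORT B =====
-- ws = [i for i, c in enumerate(text) if c.isspace()]
def pvWsIndices (text : String) : List Int :=
  ((PySem.List.enumerate text.toList).filter (fun p => PySem.Chars.isspace p.2)).map Prod.fst

-- cuts(start): the recursion computing the boundary list; a pair (s, none) is the tail
-- segment text[s:]. Fuel strictly exceeds the recursion depth whenever B terminates.
def pvCuts (ws : List Int) (n max_len min_len : Int) : Nat → Int → List (Int × Option Int)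
  | 0, _ => []
  | fuel+1, start =>
    if n - start ≤ max_len then [(start, none)]
    else
      let cut := start + max_len
      let bound := max (start + min_len) start
      let idx : Int := ((PySem.List.bisectLeft ws cut : Nat) : Int) - 1
      let best := if 0 ≤ idx ∧ bound ≤ PySem.List.pyGetD ws idx 0
        then PySem.List.pyGetD ws idx 0 + 1 else cut
      (start, some best) :: pvCuts ws n max_len min_len fuel best

def smart_segment_alt (text : String) (tags : List String) (max_len : Int) (min_len : Int) :
    List (String × List String) :=
  if PySem.Str.len text ≤ max_len then [(text, tags)]
  else
    (pvCuts (pvWsIndices text) (PySem.Str.len text) max_len min_len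
        (text.toList.length + 1) 0).map
      (fun p => (PySem.Str.slice text (some p.1) p.2, PySem.List.slice tags (some p.1) p.2))

-- ===== PRECONDITION & SPEC =====
-- Pre_ excludes inputs with len(text) > max_len and max_len ≤ 0: there the cut point never
-- advances, so A's while-loop runs forever (except on empty text with negative max_len, where
-- A's while-guard is immediately false and it returns []) and B's recursion runs forever.
def Pre_smart_segment (text : String) (tags : List String) (max_len : Int) (min_len : Int) : Prop :=
  PySem.Str.len text ≤ max_len ∨ 1 ≤ max_len

instance (text : String) (tags : List String) (max_len : Int) (min_len : Int) :
    Decidable (Pre_smart_segment text tags max_len min_len) := by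
  unfold Pre_smart_segment; infer_instance

def pvWitness_smart_segment : String × List String × Int × Int :=
  ("ab cd ef", ["O", "O", "B", "O", "O", "O", "O", "O"], 4, 1)

def Spec_smart_segment (text : String) (tags : List String) (max_len : Int) (min_len : Int) (out : List (String × List String)) : Prop := out = smart_segment_alt text tags max_len min_len
instance (text : String) (tags : List String) (max_len : Int) (min_len : Int) (out : List (String × List String)) : Decidable (Spec_smart_segment text tags max_len min_len out) := by unfold Spec_smart_segment; infer_instance

-- ===== CLAIM (what is proved, stated in full; the proofs are below) =====
def Claim_equal_smart_segment : Prop := ∀ (text : String) (tags : List String) (max_len : Int) (min_len : Int), Dom_smart_segment text tags max_len min_len → Pre_smart_segment text tags max_len min_len → Spec_smart_segment text tags max_len min_len (smart_segment text tags max_len min_len)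

-- ===== LEMMAS AND PROOFS =====

lemma pvWs_pairwise (text : String) : (pvWsIndices text).Pairwise (· < ·) := by
  unfold pvWsIndices
  rw [List.pairwise_map]
  exact (PySem.List.pairwise_lt_enumerate text.toList 0).filter _

lemma mem_pvWs (text : String) (x : Int) :
    x ∈ pvWsIndices text ↔
      ∃ k : Nat, ∃ _ : k < text.toList.length,
        x = (k : Int) ∧ PySem.Chars.isspace text.toList[k] = true := by
  unfold pvWsIndices
  simp only [List.mem_map, List.mem_filter, PySem.List.mem_enumerate_iff]
  constructor
  · rintro ⟨p, ⟨⟨k, hk, rfl⟩, hsp⟩, rfl⟩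
    exact ⟨k, hk, by simp, by simpa using hsp⟩
  · rintro ⟨k, hk, rfl, hsp⟩
    exact ⟨((k : Int), text.toList[k]), ⟨⟨k, hk, by simp⟩, hsp⟩, rfl⟩

lemma isSpaceAt_mem_iff (text : String) (j : Int) (h0 : 0 ≤ j)
    (h1 : j < (text.toList.length : Int)) :
    pvIsSpaceAt text (j + 1) = true ↔ j ∈ pvWsIndices text := by
  obtain ⟨k, rfl⟩ : ∃ k : Nat, j = (k : Int) := ⟨j.toNat, (Int.toNat_of_nonneg h0).symm⟩
  have hk : k < text.toList.length := by exact_mod_cast h1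
  unfold pvIsSpaceAt
  rw [mem_pvWs]
  have hidx : (k : Int) + 1 - 1 = (k : Int) := by ring
  rw [hidx]
  simp only [PySem.Str.pyGet?_natCast, List.getElem?_eq_getElem hk, Option.elim_some]
  constructor
  · intro h; exact ⟨k, hk, rfl, h⟩
  · rintro ⟨k', hk', hkeq, h⟩
    have : k' = k := by omega
    subst this; exact h

lemma find?_desc_max (pred : Int → Bool) (b : Int) :
    ∀ (k : Nat) (a w : Int), (a - b).toNat = k → b < w → w ≤ a → pred w = true →
      (∀ j : Int, w < j → j ≤ a → pred j = false) →
      (PySem.List.pyRange a b (-1)).find? pred = some w := by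
  intro k
  induction k with
  | zero => intro a w hk hbw hwa _ _; omega
  | succ m ih =>
    intro a w hk hbw hwa hpw hmax
    have hba : b < a := by omega
    rw [PySem.List.pyRange_neg_one_cons hba, List.find?_cons]
    by_cases hwa' : w = a
    · subst hwa'; simp [hpw]
    · have hpa : pred a = false := hmax a (by omega) le_rfl
      simp only [hpa]
      exact ih (a - 1) w (by omega) hbw (by omega) hpw (fun j hj hja => hmax j hj (by omega))

-- the heart: per segment, A's backward scan and B's bisect lookup compute the same cut point
lemma best_eq (text : String) (start max_len min_len : Int) (h0 : 0 ≤ start)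
    (hcut : start + max_len < (text.toList.length : Int)) :
    ((PySem.List.pyRange (start + max_len) (max (start + min_len) start) (-1)).find?
        (fun i => pvIsSpaceAt text i)).getD (start + max_len)
    = (if 0 ≤ ((PySem.List.bisectLeft (pvWsIndices text) (start + max_len) : Nat) : Int) - 1 ∧
          max (start + min_len) start ≤
            PySem.List.pyGetD (pvWsIndices text)
              (((PySem.List.bisectLeft (pvWsIndices text) (start + max_len) : Nat) : Int) - 1) 0
        then PySem.List.pyGetD (pvWsIndices text)
              (((PySem.List.bisectLeft (pvWsIndices text) (start + max_len) : Nat) : Int) - 1) 0 + 1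
        else start + max_len) := by
  set cut := start + max_len with hcutdef
  set bound := max (start + min_len) start with hbound
  set ws := pvWsIndices text with hws
  have hb0 : 0 ≤ bound := by omega
  have hsorted : ws.Pairwise (· ≤ ·) := (pvWs_pairwise text).imp (fun h => le_of_lt h)
  obtain ⟨hlen, hbelow, habove⟩ := PySem.List.bisectLeft_spec ws cut hsorted
  set bl := PySem.List.bisectLeft ws cut with hbl
  -- any in-window whitespace index lies in ws below position bl
  have key : ∀ j : Int, bound ≤ j → j < cut → pvIsSpaceAt text (j + 1) = true →
      ∃ m : Nat, ∃ hm : m < ws.length, ws[m] = j ∧ m < bl := by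
    intro j hbj hjc hsp
    have hj0 : 0 ≤ j := le_trans hb0 hbj
    have hjn : j < (text.toList.length : Int) := lt_trans hjc hcut
    have hmem : j ∈ ws := (isSpaceAt_mem_iff text j hj0 hjn).mp hsp
    obtain ⟨m, hm, hget⟩ := List.mem_iff_getElem.mp hmem
    refine ⟨m, hm, hget, ?_⟩
    by_contra hnot
    have := habove m hm (by omega)
    omega
  by_cases hc : 0 ≤ ((bl : Nat) : Int) - 1 ∧
      bound ≤ PySem.List.pyGetD ws (((bl : Nat) : Int) - 1) 0
  · -- bisect found an admissible whitespace index w; A's scan finds w+1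
    obtain ⟨hidx, hbw⟩ := hc
    have hbl1 : 1 ≤ bl := by omega
    have hltlen : bl - 1 < ws.length := by omega
    have hgd : PySem.List.pyGetD ws (((bl : Nat) : Int) - 1) 0 = ws[bl - 1] := by
      have : ((bl : Nat) : Int) - 1 = ((bl - 1 : Nat) : Int) := by omega
      rw [this, PySem.List.pyGetD_natCast]
      exact List.getD_eq_getElem _ _ hltlen
    rw [hgd] at hbw ⊢
    rw [if_pos ⟨hidx, hbw⟩]
    set w := ws[bl - 1] with hwdef
    have hwcut : w < cut := hbelow (bl - 1) hltlen (by omega)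
    have hwmem : w ∈ ws := List.getElem_mem _
    have hw0 : (0 : Int) ≤ w := by
      obtain ⟨k, hk, hkeq, _⟩ := (mem_pvWs text w).mp hwmem
      omega
    have hwsp : pvIsSpaceAt text (w + 1) = true := by
      rw [isSpaceAt_mem_iff text w hw0 (lt_trans hwcut hcut)]; exact hwmem
    rw [find?_desc_max _ bound (cut - bound).toNat (cut) (w + 1) rfl (by omega) (by omega) hwsp ?_]
    · simp
    · intro j hj hja
      cases hsp : pvIsSpaceAt text j with
      | false => simp
      | true =>
      exfalso
      have hsp' : pvIsSpaceAt text ((j - 1) + 1) = true := by simpa using hsp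
      obtain ⟨m, hm, hget, hmbl⟩ := key (j - 1) (by omega) (by omega) hsp'
      have hle : ws[m] ≤ w := by
        rcases Nat.lt_or_ge m (bl - 1) with hlt | hge
        · exact le_of_lt ((List.pairwise_iff_getElem.mp (pvWs_pairwise text)) m (bl - 1) hm hltlen hlt)
        · have : m = bl - 1 := by omega
          subst this; exact le_rfl
      omega
  · -- bisect found nothing admissible; A's scan finds nothing either
    rw [if_neg hc]
    have hnone : (PySem.List.pyRange cut bound (-1)).find? (fun i => pvIsSpaceAt text i) = none := by
      rw [List.find?_eq_none]
      intro i hi hsp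
      have hmem := (PySem.List.mem_pyRange_neg_one).mp hi
      have hsp' : pvIsSpaceAt text ((i - 1) + 1) = true := by simpa using hsp
      obtain ⟨m, hm, hget, hmbl⟩ := key (i - 1) (by omega) (by omega) hsp'
      apply hc
      have hbl1 : 1 ≤ bl := by omega
      have hltlen : bl - 1 < ws.length := by omega
      have hgd : PySem.List.pyGetD ws (((bl : Nat) : Int) - 1) 0 = ws[bl - 1] := by
        have : ((bl : Nat) : Int) - 1 = ((bl - 1 : Nat) : Int) := by omega
        rw [this, PySem.List.pyGetD_natCast]
        exact List.getD_eq_getElem _ _ hltlen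
      refine ⟨by omega, ?_⟩
      rw [hgd]
      have hle : ws[m] ≤ ws[bl - 1] := by
        rcases Nat.lt_or_ge m (bl - 1) with hlt | hge
        · exact le_of_lt ((List.pairwise_iff_getElem.mp (pvWs_pairwise text)) m (bl - 1) hm hltlen hlt)
        · have : m = bl - 1 := by omega
          subst this; exact le_rfl
      omega
    rw [hnone]
    rfl

-- A's accumulator loop produces exactly acc ++ the slices of B's boundary list
lemma loop_eq_cuts (text : String) (tags : List String) (max_len min_len : Int)
    (hml : 1 ≤ max_len) :
    ∀ (fuel : Nat) (start : Int) (acc : List (String × List String)),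
      0 ≤ start → start < ((text.toList.length : Nat) : Int) →
      pvSegLoopA text tags max_len min_len ((text.toList.length : Nat) : Int) fuel start acc
      = acc ++ (pvCuts (pvWsIndices text) ((text.toList.length : Nat) : Int)
            max_len min_len fuel start).map
          (fun p => (PySem.Str.slice text (some p.1) p.2,
                     PySem.List.slice tags (some p.1) p.2)) := by
  intro fuel
  induction fuel with
  | zero => intro start acc _ _; simp [pvSegLoopA, pvCuts]
  | succ m ih =>
    intro start acc h0 hlt
    simp only [pvSegLoopA, pvCuts]
    rw [if_pos hlt]
    by_cases htail : ((text.toList.length : Nat) : Int) - start ≤ max_len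
    · rw [if_pos htail, if_pos htail]
      simp
    · rw [if_neg htail, if_neg htail]
      have hcut : start + max_len < (text.toList.length : Int) := by
        push_cast at htail ⊢; omega
      have hbe := best_eq text start max_len min_len h0 hcut
      rw [hbe]
      set bestB := (if 0 ≤ ((PySem.List.bisectLeft (pvWsIndices text) (start + max_len) : Nat) : Int) - 1 ∧
            max (start + min_len) start ≤
              PySem.List.pyGetD (pvWsIndices text)
                (((PySem.List.bisectLeft (pvWsIndices text) (start + max_len) : Nat) : Int) - 1) 0
          then PySem.List.pyGetD (pvWsIndices text)
                (((PySem.List.bisectLeft (pvWsIndices text) (start + max_len) : Nat) : Int) - 1) 0 + 1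
          else start + max_len) with hbB
    -- best stays in [0, n): it is at most cut < n and nonnegative
      have hBrange : 0 ≤ bestB ∧ bestB < ((text.toList.length : Nat) : Int) := by
        rw [hbB]
        split_ifs with h
        · constructor
          · omega
          · -- ws[idx] < cut by bisectLeft_spec, so ws[idx]+1 ≤ cut < n
            obtain ⟨hlen, hbelow, _⟩ :=
              PySem.List.bisectLeft_spec (pvWsIndices text) (start + max_len)
                ((pvWs_pairwise text).imp (fun h => le_of_lt h))
            set bl := PySem.List.bisectLeft (pvWsIndices text) (start + max_len)
            have hbl1 : 1 ≤ bl := by omega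
            have hltlen : bl - 1 < (pvWsIndices text).length := by omega
            have hgd : PySem.List.pyGetD (pvWsIndices text) (((bl : Nat) : Int) - 1) 0
                = (pvWsIndices text)[bl - 1] := by
              have : ((bl : Nat) : Int) - 1 = ((bl - 1 : Nat) : Int) := by omega
              rw [this, PySem.List.pyGetD_natCast]
              exact List.getD_eq_getElem _ _ hltlen
            have := hbelow (bl - 1) hltlen (by omega)
            omega
        · omega
      rw [ih bestB _ hBrange.1 hBrange.2]
      simp

-- ===== VERDICT (by name: the statement is the Claim_ definition above) =====
theorem smart_segment_spec : Claim_equal_smart_segment := by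
  intro text tags max_len min_len _ hpre
  unfold Spec_smart_segment smart_segment smart_segment_alt
  by_cases hsmall : PySem.Str.len text ≤ max_len
  · rw [if_pos hsmall, if_pos hsmall]
  · rw [if_neg hsmall, if_neg hsmall]
    have hml : 1 ≤ max_len := hpre.resolve_left hsmall
    have hlen : PySem.Str.len text = (text.toList.length : Int) := by
      simp [PySem.Str.len_eq]
    rw [hlen]
    rw [loop_eq_cuts text tags max_len min_len hml (text.toList.length + 1) 0 []
      le_rfl (by omega)]
    simp
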